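-- pv_equiv track=rewrite | github.com/yoseidonn/Kelebek | App/database.py | create_arrangement
-- ===== SOURCE A (Python) =====
-- def create_arrangement(kacli: str, ogretmen_yonu: str, oturma_duzeni: str):
--     rowCounts = oturma_duzeni.split(",")
--     matrix = []
--     # KUTUCUKLARI KOY
--     for rowCount in rowCounts:
--         matrix.append([])
--         for _ in range( int(rowCount) ):
--             matrix[-1].append({})
--
--     #INDEXLERI YERLESTIR
--     deskNo = 1
--     if ogretmen_yonu == "Solda":
--         for colIndex in range(len(matrix)):
--             for rowIndex in range(len(matrix[colIndex])):
--                 matrix[colIndex][rowIndex].update({deskNo: None})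
--                 deskNo += 1
--                 if kacli == "2'li":
--                     matrix[colIndex][rowIndex].update({deskNo: None})
--                     deskNo += 1
--
--     else:
--         for colIndex in range(len(matrix) - 1 , -1, -1):
--             for rowIndex in range(len(matrix[colIndex])):
--                 if kacli == "1'li":
--                     matrix[colIndex][rowIndex].update({deskNo: None})
--                     deskNo += 1
--                 else:
--                     deskNo += 1
--                     matrix[colIndex][rowIndex].update({deskNo: None})
--                     deskNo -= 1
--                     matrix[colIndex][rowIndex].update({deskNo: None})
--                     deskNo += 2
--
--     return matrix
-- ===== SOURCE B (Python) =====
-- def create_arrangement(kacli: str, ogretmen_yonu: str, oturma_duzeni: str):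
--     # One pass: column sizes parsed once, start numbers computed arithmetically
--     # from cumulative desk counts (front-to-back for "Solda", back-to-front otherwise).
--     sizes = [max(int(t), 0) for t in oturma_duzeni.split(",")]
--     if ogretmen_yonu == "Solda":
--         step = 2 if kacli == "2'li" else 1
--         starts, acc = [], 1
--         for s in sizes:
--             starts.append(acc)
--             acc += s * step
--     else:
--         step = 1 if kacli == "1'li" else 2
--         starts, acc = [], 1
--         for s in reversed(sizes):
--             starts.append(acc)
--             acc += s * step
--         starts.reverse()
--     if step == 1:
--         return [[{b + r: None} for r in range(s)] for s, b in zip(sizes, starts)]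
--     elif ogretmen_yonu == "Solda":
--         return [[{b + 2 * r: None, b + 2 * r + 1: None} for r in range(s)] for s, b in zip(sizes, starts)]
--     else:
--         return [[{b + 2 * r + 1: None, b + 2 * r: None} for r in range(s)] for s, b in zip(sizes, starts)]
-- ===== Notes on version B (the rewrite author's own statement) =====
-- stated objective: alternative
-- what changed: B replaces A's two-phase allocate-empty-dicts-then-mutate-with-a-running-counter numbering by a single arithmetic pass: column sizes are parsed once, each column's starting desk number is computed from cumulative desk counts (front-to-back for 'Solda', back-to-front otherwise), and every cell dict is created directly with its final key(s).
import Mathlib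
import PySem

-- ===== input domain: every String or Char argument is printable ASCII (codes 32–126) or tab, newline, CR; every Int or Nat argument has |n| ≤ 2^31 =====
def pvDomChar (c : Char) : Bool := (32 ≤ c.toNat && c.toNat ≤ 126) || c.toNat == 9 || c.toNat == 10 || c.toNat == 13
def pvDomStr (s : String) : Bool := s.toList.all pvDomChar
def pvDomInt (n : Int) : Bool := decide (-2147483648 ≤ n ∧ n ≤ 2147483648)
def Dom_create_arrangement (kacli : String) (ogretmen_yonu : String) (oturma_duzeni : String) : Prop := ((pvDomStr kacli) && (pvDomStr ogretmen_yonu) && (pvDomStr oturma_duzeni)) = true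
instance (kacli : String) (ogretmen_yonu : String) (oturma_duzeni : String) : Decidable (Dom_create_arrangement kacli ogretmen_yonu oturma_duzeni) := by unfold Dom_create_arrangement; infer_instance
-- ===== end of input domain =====

-- B replaces A's two-phase build-then-mutate numbering by a single arithmetic pass
-- (per-column start numbers from cumulative desk counts); same return value.

-- ===== PORT A =====
def create_arrangement (kacli : String) (ogretmen_yonu : String) (oturma_duzeni : String) : List (List (List (Int × Option Int))) :=
  let rowCounts : List String := (PySem.Str.split? oturma_duzeni ",").getD []
  -- KUTUCUKLARI KOY: matrix.append([]); for _ in range(int(rowCount)): matrix[-1].append({})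
  let matrix : List (List (PySem.Dict Int (Option Int))) :=
    rowCounts.foldl (fun m rowCount =>
      m ++ [(PySem.List.pyRange 0 ((PySem.Int.ofStr? rowCount).getD 0) 1).foldl
              (fun col _ => col ++ [(PySem.Dict.empty : PySem.Dict Int (Option Int))]) []]) []
  -- INDEXLERI YERLESTIR (deskNo starts at 1; state = (matrix, deskNo))
  let final :=
    if ogretmen_yonu == "Solda" then
      (PySem.List.pyRange 0 (matrix.length : Int) 1).foldl
        (fun (st : List (List (PySem.Dict Int (Option Int))) × Int) colIndex =>
          (PySem.List.pyRange 0 ((PySem.List.pyGetD st.1 colIndex []).length : Int) 1).foldl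
            (fun st2 rowIndex =>
              let st3 := (st2.1.modify colIndex.toNat (fun col => col.modify rowIndex.toNat (fun d => d.insert st2.2 none)), st2.2 + 1)
              if kacli == "2'li" then
                (st3.1.modify colIndex.toNat (fun col => col.modify rowIndex.toNat (fun d => d.insert st3.2 none)), st3.2 + 1)
              else st3) st) (matrix, (1 : Int))
    else
      (PySem.List.pyRange ((matrix.length : Int) - 1) (-1) (-1)).foldl
        (fun (st : List (List (PySem.Dict Int (Option Int))) × Int) colIndex =>
          (PySem.List.pyRange 0 ((PySem.List.pyGetD st.1 colIndex []).length : Int) 1).foldl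
            (fun st2 rowIndex =>
              if kacli == "1'li" then
                (st2.1.modify colIndex.toNat (fun col => col.modify rowIndex.toNat (fun d => d.insert st2.2 none)), st2.2 + 1)
              else
                let c1 := st2.2 + 1
                let m1 := st2.1.modify colIndex.toNat (fun col => col.modify rowIndex.toNat (fun d => d.insert c1 none))
                let c2 := c1 - 1
                let m2 := m1.modify colIndex.toNat (fun col => col.modify rowIndex.toNat (fun d => d.insert c2 none))
                (m2, c2 + 2)) st) (matrix, (1 : Int))
  final.1.map (fun col => col.map (fun d => d.items))

-- ===== PORT B =====
def create_arrangement_alt (kacli : String) (ogretmen_yonu : String) (oturma_duzeni : String) : List (List (List (Int × Option Int))) :=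
  let sizes : List Int := ((PySem.Str.split? oturma_duzeni ",").getD []).map (fun t => max ((PySem.Int.ofStr? t).getD 0) 0)
  let step : Int := if ogretmen_yonu == "Solda" then (if kacli == "2'li" then 2 else 1) else (if kacli == "1'li" then 1 else 2)
  let starts : List Int :=
    if ogretmen_yonu == "Solda" then
      (sizes.foldl (fun (st : List Int × Int) s => (st.1 ++ [st.2], st.2 + s * step)) ([], 1)).1
    else
      ((sizes.reverse.foldl (fun (st : List Int × Int) s => (st.1 ++ [st.2], st.2 + s * step)) ([], 1)).1).reverse
  if step == 1 then
    (sizes.zip starts).map (fun p => (List.range p.1.toNat).map (fun r => [(p.2 + (r : Int), (none : Option Int))]))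
  else if ogretmen_yonu == "Solda" then
    (sizes.zip starts).map (fun p => (List.range p.1.toNat).map (fun r => [(p.2 + 2 * (r : Int), (none : Option Int)), (p.2 + 2 * (r : Int) + 1, none)]))
  else
    (sizes.zip starts).map (fun p => (List.range p.1.toNat).map (fun r => [(p.2 + 2 * (r : Int) + 1, (none : Option Int)), (p.2 + 2 * (r : Int), none)]))

-- ===== PRECONDITION & SPEC =====
-- Pre_ excludes exactly the inputs where Python A raises ValueError: some token of
-- oturma_duzeni.split(",") is not a valid int() literal (B raises there too).
def Pre_create_arrangement (kacli : String) (ogretmen_yonu : String) (oturma_duzeni : String) : Prop :=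
  ∀ t ∈ (PySem.Str.split? oturma_duzeni ",").getD [], (PySem.Int.ofStr? t).isSome = true
instance (kacli : String) (ogretmen_yonu : String) (oturma_duzeni : String) : Decidable (Pre_create_arrangement kacli ogretmen_yonu oturma_duzeni) := by unfold Pre_create_arrangement; infer_instance

def pvWitness_create_arrangement : String × String × String := ("2'li", "Solda", "2,3")

def Spec_create_arrangement (kacli : String) (ogretmen_yonu : String) (oturma_duzeni : String) (out : List (List (List (Int × Option Int)))) : Prop := out = create_arrangement_alt kacli ogretmen_yonu oturma_duzeni
instance (kacli : String) (ogretmen_yonu : String) (oturma_duzeni : String) (out : List (List (List (Int × Option Int)))) : Decidable (Spec_create_arrangement kacli ogretmen_yonu oturma_duzeni out) := by unfold Spec_create_arrangement; infer_instance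

-- ===== CLAIM (what is proved, stated in full; the proofs are below) =====
def Claim_equal_create_arrangement : Prop := ∀ (kacli : String) (ogretmen_yonu : String) (oturma_duzeni : String), Dom_create_arrangement kacli ogretmen_yonu oturma_duzeni → Pre_create_arrangement kacli ogretmen_yonu oturma_duzeni → Spec_create_arrangement kacli ogretmen_yonu oturma_duzeni (create_arrangement kacli ogretmen_yonu oturma_duzeni)

-- ===== LEMMAS AND PROOFS =====

abbrev PvCell : Type := PySem.Dict Int (Option Int)
abbrev PvMat : Type := List (List PvCell)

-- desk-numbering step functions of A, in canonical form (upd = one cell's dict update, step = desks per cell)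
def pvInner (upd : PvCell → Int → PvCell) (step : Int) (i : Int) : (PvMat × Int) → Int → (PvMat × Int) :=
  fun st r => (st.1.modify i.toNat (fun col => col.modify r.toNat (fun d => upd d st.2)), st.2 + step)

def pvOuter (upd : PvCell → Int → PvCell) (step : Int) : (PvMat × Int) → Int → (PvMat × Int) :=
  fun st i => (PySem.List.pyRange 0 ((PySem.List.pyGetD st.1 i []).length : Int) 1).foldl (pvInner upd step i) st

-- closed-form numbering: front-to-back (pvNumF) and back-to-front (pvNumR)
def pvNumCol (upd : PvCell → Int → PvCell) (step : Int) (n : Nat) (c : Int) : List PvCell :=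
  (List.range n).map (fun r => upd PySem.Dict.empty (c + step * (r : Int)))

def pvNumF (upd : PvCell → Int → PvCell) (step : Int) : PvMat → Int → PvMat × Int
  | [], c => ([], c)
  | col :: rest, c =>
    let p := pvNumF upd step rest (c + step * col.length)
    (pvNumCol upd step col.length c :: p.1, p.2)

def pvNumR (upd : PvCell → Int → PvCell) (step : Int) : PvMat → Int → PvMat × Int
  | [], c => ([], c)
  | col :: rest, c =>
    let p := pvNumR upd step rest c
    (pvNumCol upd step col.length p.2 :: p.1, p.2 + step * col.length)

def pvStarts (step : Int) : List Int → Int → List Int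
  | [], _ => []
  | s :: rest, c => c :: pvStarts step rest (c + s * step)

theorem pv_modify_id {α : Type} (m : List α) (i : Nat) : m.modify i (fun a => a) = m := by
  induction m generalizing i with
  | nil => simp
  | cons x xs ih => cases i <;> simp [List.modify_succ_cons, ih]

theorem pv_modify_modify {α : Type} (l : List α) (i : Nat) (f g : α → α) :
    (l.modify i f).modify i g = l.modify i (fun a => g (f a)) := by
  induction l generalizing i with
  | nil => simp
  | cons x xs ih =>
    cases i with
    | zero => simp
    | succ n => simp [List.modify_succ_cons, ih]

theorem pv_modify_append_cons {α : Type} (xs ys : List α) (y : α) (f : α → α) :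
    (xs ++ y :: ys).modify xs.length f = xs ++ f y :: ys := by
  induction xs with
  | nil => simp
  | cons x xs ih => simpa [List.modify_succ_cons] using ih

theorem pv_fold_modify {β : Type} (l : List β) (i : Nat) (F : List PvCell → Int → β → List PvCell)
    (step : Int) (m : PvMat) (c : Int) :
    l.foldl (fun (st : PvMat × Int) r => (st.1.modify i (fun col => F col st.2 r), st.2 + step)) (m, c)
    = (m.modify i (fun col => (l.foldl (fun (st : List PvCell × Int) r => (F st.1 st.2 r, st.2 + step)) (col, c)).1),
       c + step * l.length) := by
  induction l generalizing m c with
  | nil => simp [pv_modify_id]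
  | cons r l ih =>
    simp only [List.foldl_cons, List.length_cons]
    rw [ih, pv_modify_modify, Prod.mk.injEq]
    exact ⟨rfl, by push_cast; ring⟩

theorem pv_col_fold (upd : PvCell → Int → PvCell) (step : Int) (n : Nat) (col : List PvCell) (c : Int)
    (hn : n ≤ col.length) (hemp : ∀ r, (hr : r < col.length) → col[r] = PySem.Dict.empty) :
    (PySem.List.pyRange 0 (n : Int) 1).foldl
        (fun (st : List PvCell × Int) r => (st.1.modify r.toNat (fun d => upd d st.2), st.2 + step)) (col, c)
    = ((List.range n).map (fun r => upd PySem.Dict.empty (c + step * (r : Int))) ++ col.drop n, c + step * n) := by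
  induction n with
  | zero => simp [PySem.List.pyRange_one_eq_nil]
  | succ n ih =>
    rw [show (((n : Nat) + 1 : Nat) : Int) = (n : Int) + 1 by push_cast; ring]
    rw [PySem.List.pyRange_one_succ_right (by positivity), List.foldl_append]
    rw [ih (by omega)]
    simp only [List.foldl_cons, List.foldl_nil]
    have hlt : n < col.length := by omega
    rw [List.drop_eq_getElem_cons hlt, hemp n hlt, Prod.mk.injEq]
    constructor
    · rw [show ((n:Int).toNat) = ((List.range n).map (fun r => upd PySem.Dict.empty (c + step * (r : Int)))).length by simp]
      rw [pv_modify_append_cons]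
      simp [List.range_succ]
    · ring

theorem pv_outer_step (upd : PvCell → Int → PvCell) (step : Int) (done rest : PvMat) (col : List PvCell)
    (c : Int) (hemp : ∀ d ∈ col, d = PySem.Dict.empty) :
    pvOuter upd step (done ++ col :: rest, c) (done.length : Int)
    = (done ++ pvNumCol upd step col.length c :: rest, c + step * col.length) := by
  have hemp' : ∀ r, (hr : r < col.length) → col[r] = PySem.Dict.empty :=
    fun r hr => hemp _ (List.getElem_mem hr)
  have hget : PySem.List.pyGetD (done ++ col :: rest) ((done.length : Nat) : Int) [] = col := by
    rw [PySem.List.pyGetD_natCast]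
    simp [List.getD]
  show (PySem.List.pyRange 0 _ 1).foldl (pvInner upd step (done.length : Int)) _ = _
  rw [hget]
  have hfun : pvInner upd step ((done.length : Nat) : Int)
      = fun (st : PvMat × Int) r => (st.1.modify done.length
          (fun colX => colX.modify r.toNat (fun d => upd d st.2)), st.2 + step) := by
    funext st r
    simp [pvInner]
  rw [hfun]
  rw [pv_fold_modify (PySem.List.pyRange 0 ((col.length : Nat) : Int) 1) done.length
    (fun colX cX r => colX.modify r.toNat (fun d => upd d cX)) step (done ++ col :: rest) c]
  rw [pv_modify_append_cons, Prod.mk.injEq]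
  constructor
  · rw [pv_col_fold upd step col.length col c (le_refl _) hemp']
    simp [pvNumCol]
  · rw [PySem.List.length_pyRange_one]
    simp

theorem pv_outer_F (upd : PvCell → Int → PvCell) (step : Int) (todo : PvMat) (done : PvMat) (c : Int)
    (hemp : ∀ col ∈ todo, ∀ d ∈ col, d = PySem.Dict.empty) :
    (PySem.List.pyRange (done.length : Int) ((done.length + todo.length : Nat) : Int) 1).foldl
        (pvOuter upd step) (done ++ todo, c)
    = (done ++ (pvNumF upd step todo c).1, (pvNumF upd step todo c).2) := by
  induction todo generalizing done c with
  | nil =>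
    rw [PySem.List.pyRange_one_eq_nil (by simp)]
    simp [pvNumF]
  | cons col rest ih =>
    have hlt : (done.length : Int) < ((done.length + (col :: rest).length : Nat) : Int) := by
      simp only [List.length_cons]; push_cast; omega
    rw [PySem.List.pyRange_one_cons hlt, List.foldl_cons]
    rw [pv_outer_step upd step done rest col c (hemp col (by simp))]
    have e1 : (done.length : Int) + 1 = (((done ++ [pvNumCol upd step col.length c]).length : Nat) : Int) := by
      push_cast; simp
    have e2 : ((done.length + (col :: rest).length : Nat) : Int)
        = (((done ++ [pvNumCol upd step col.length c]).length + rest.length : Nat) : Int) := by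
      push_cast; simp; ring
    rw [e1, e2, show done ++ pvNumCol upd step col.length c :: rest
        = (done ++ [pvNumCol upd step col.length c]) ++ rest by simp]
    rw [ih (done ++ [pvNumCol upd step col.length c]) (c + step * col.length)
        (fun x hx => hemp x (by simp [hx]))]
    simp [pvNumF]

theorem pvNumR_append_singleton (upd : PvCell → Int → PvCell) (step : Int) (ts : PvMat) (col : List PvCell) (c : Int) :
    pvNumR upd step (ts ++ [col]) c
    = ((pvNumR upd step ts (c + step * col.length)).1 ++ [pvNumCol upd step col.length c],
       (pvNumR upd step ts (c + step * col.length)).2) := by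
  induction ts with
  | nil => simp [pvNumR]
  | cons x ts ih => simp [pvNumR, ih]

theorem pv_outer_R (upd : PvCell → Int → PvCell) (step : Int) (todo : PvMat) (done : PvMat) (c : Int)
    (hemp : ∀ col ∈ todo, ∀ d ∈ col, d = PySem.Dict.empty) :
    (PySem.List.pyRange ((todo.length : Int) - 1) (-1) (-1)).foldl (pvOuter upd step) (todo ++ done, c)
    = ((pvNumR upd step todo c).1 ++ done, (pvNumR upd step todo c).2) := by
  induction todo using List.reverseRecOn generalizing done c with
  | nil =>
    rw [PySem.List.pyRange_neg_one_eq_nil (by simp)]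
    simp [pvNumR]
  | append_singleton ts col ih =>
    rw [show (((ts ++ [col]).length : Nat) : Int) - 1 = ((ts.length : Nat) : Int) by
      simp]
    rw [PySem.List.pyRange_neg_one_cons (show (-1 : Int) < (ts.length : Nat) by omega),
        List.foldl_cons]
    rw [show (ts ++ [col]) ++ done = ts ++ col :: done by simp]
    rw [pv_outer_step upd step ts done col c (hemp col (by simp))]
    rw [ih (pvNumCol upd step col.length c :: done) (c + step * col.length)
        (fun x hx => hemp x (by simp [hx]))]
    rw [pvNumR_append_singleton]
    simp

theorem pv_matrix_eq (ts : List String) :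
    ts.foldl (fun m rowCount =>
      m ++ [(PySem.List.pyRange 0 ((PySem.Int.ofStr? rowCount).getD 0) 1).foldl
              (fun col _ => col ++ [(PySem.Dict.empty : PySem.Dict Int (Option Int))]) []]) []
    = (ts.map (fun t => max ((PySem.Int.ofStr? t).getD 0) 0)).map
        (fun s => List.replicate s.toNat (PySem.Dict.empty : PvCell)) := by
  rw [PySem.List.foldl_append_singleton_eq_map
    (fun rowCount => (PySem.List.pyRange 0 ((PySem.Int.ofStr? rowCount).getD 0) 1).foldl
      (fun col _ => col ++ [(PySem.Dict.empty : PySem.Dict Int (Option Int))]) []) ts []]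
  rw [List.map_map, List.nil_append]
  apply List.map_congr_left
  intro t _
  rw [PySem.List.foldl_append_singleton_eq_map (fun _ => (PySem.Dict.empty : PvCell))]
  rw [List.nil_append, List.map_const', PySem.List.length_pyRange_one]
  show List.replicate (((PySem.Int.ofStr? t).getD 0 - 0).toNat) (PySem.Dict.empty : PvCell)
    = List.replicate ((max ((PySem.Int.ofStr? t).getD 0) 0).toNat) (PySem.Dict.empty : PvCell)
  congr 1
  omega

theorem pv_scan (step : Int) (sizes : List Int) (acc : List Int) (c : Int) :
    (sizes.foldl (fun (st : List Int × Int) s => (st.1 ++ [st.2], st.2 + s * step)) (acc, c)).1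
    = acc ++ pvStarts step sizes c := by
  induction sizes generalizing acc c with
  | nil => simp [pvStarts]
  | cons s rest ih => simp [pvStarts, ih]

theorem pvStarts_append (step : Int) (l1 l2 : List Int) (c : Int) :
    pvStarts step (l1 ++ l2) c = pvStarts step l1 c ++ pvStarts step l2 (c + l1.sum * step) := by
  induction l1 generalizing c with
  | nil => simp [pvStarts]
  | cons s rest ih =>
    simp only [List.cons_append, pvStarts, List.sum_cons]
    rw [ih, show c + s * step + rest.sum * step = c + (s + rest.sum) * step by ring]

theorem pvNumR_snd (upd : PvCell → Int → PvCell) (step : Int) (sizes : List Int) (c : Int)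
    (hpos : ∀ s ∈ sizes, 0 ≤ s) :
    (pvNumR upd step (sizes.map (fun s => List.replicate s.toNat (PySem.Dict.empty : PvCell))) c).2
    = c + step * sizes.sum := by
  induction sizes with
  | nil => simp [pvNumR]
  | cons s rest ih =>
    simp only [List.map_cons, pvNumR, List.sum_cons, List.length_replicate]
    rw [ih (fun x hx => hpos x (by simp [hx]))]
    rw [Int.toNat_of_nonneg (hpos s (by simp))]
    ring

theorem pv_B_forward (upd : PvCell → Int → PvCell) (step : Int) (cell : Int → List (Int × Option Int))
    (hc : ∀ c, (upd PySem.Dict.empty c).items = cell c)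
    (sizes : List Int) (hpos : ∀ s ∈ sizes, 0 ≤ s) (c : Int) :
    ((pvNumF upd step (sizes.map (fun s => List.replicate s.toNat (PySem.Dict.empty : PvCell))) c).1).map
        (fun col => col.map (fun d => d.items))
    = (sizes.zip (pvStarts step sizes c)).map
        (fun p => (List.range p.1.toNat).map (fun r => cell (p.2 + step * r))) := by
  induction sizes generalizing c with
  | nil => simp [pvNumF, pvStarts]
  | cons s rest ih =>
    simp only [List.map_cons, pvNumF, pvStarts, List.zip_cons_cons, List.length_replicate]
    congr 1
    · simp [pvNumCol, List.map_map, hc]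
    · rw [show c + step * ((s.toNat : Nat) : Int) = c + s * step by
        rw [Int.toNat_of_nonneg (hpos s (by simp))]; ring]
      exact ih (fun x hx => hpos x (by simp [hx])) _

theorem pv_B_reverse (upd : PvCell → Int → PvCell) (step : Int) (cell : Int → List (Int × Option Int))
    (hc : ∀ c, (upd PySem.Dict.empty c).items = cell c)
    (sizes : List Int) (hpos : ∀ s ∈ sizes, 0 ≤ s) (c : Int) :
    ((pvNumR upd step (sizes.map (fun s => List.replicate s.toNat (PySem.Dict.empty : PvCell))) c).1).map
        (fun col => col.map (fun d => d.items))
    = (sizes.zip ((pvStarts step sizes.reverse c).reverse)).map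
        (fun p => (List.range p.1.toNat).map (fun r => cell (p.2 + step * r))) := by
  induction sizes generalizing c with
  | nil => simp [pvNumR, pvStarts]
  | cons s rest ih =>
    simp only [List.map_cons, pvNumR, List.reverse_cons, List.length_replicate]
    rw [pvStarts_append, List.sum_reverse]
    simp only [pvStarts, List.reverse_append, List.reverse_cons, List.reverse_nil,
      List.nil_append, List.cons_append, List.zip_cons_cons, List.map_cons]
    congr 1
    · rw [pvNumR_snd upd step rest c (fun x hx => hpos x (by simp [hx]))]
      simp only [pvNumCol, List.map_map]
      apply List.map_congr_left
      intro r _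
      simp only [Function.comp_apply, hc]
      congr 1
      ring
    · exact ih (fun x hx => hpos x (by simp [hx])) c

theorem pv_items_upd1 (c : Int) :
    ((PySem.Dict.empty : PvCell).insert c none).items = [(c, none)] := by
  rw [PySem.Dict.items_insert_of_not_contains _ _ (PySem.Dict.contains_empty c)]
  rfl

theorem pv_items_upd2F (c : Int) :
    (((PySem.Dict.empty : PvCell).insert c none).insert (c + 1) none).items = [(c, none), (c + 1, none)] := by
  have h : ((PySem.Dict.empty : PvCell).insert c none).contains (c + 1) = false := by
    rw [PySem.Dict.contains_insert]
    simp only [PySem.Dict.contains_empty, Bool.or_false]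
    rw [beq_eq_false_iff_ne]
    omega
  rw [PySem.Dict.items_insert_of_not_contains _ _ h, pv_items_upd1]
  rfl

theorem pv_items_upd2R (c : Int) :
    (((PySem.Dict.empty : PvCell).insert (c + 1) none).insert c none).items = [(c + 1, none), (c, none)] := by
  have h : ((PySem.Dict.empty : PvCell).insert (c + 1) none).contains c = false := by
    rw [PySem.Dict.contains_insert]
    simp only [PySem.Dict.contains_empty, Bool.or_false]
    rw [beq_eq_false_iff_ne]
    omega
  rw [PySem.Dict.items_insert_of_not_contains _ _ h, pv_items_upd1]
  rfl

def pvSizes (d : String) : List Int :=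
  ((PySem.Str.split? d ",").getD []).map (fun t => max ((PySem.Int.ofStr? t).getD 0) 0)

def pvCols (d : String) : PvMat :=
  (pvSizes d).map (fun s => List.replicate s.toNat (PySem.Dict.empty : PvCell))

theorem pv_matrix_eq' (d : String) :
    ((PySem.Str.split? d ",").getD []).foldl (fun m rowCount =>
      m ++ [(PySem.List.pyRange 0 ((PySem.Int.ofStr? rowCount).getD 0) 1).foldl
              (fun col _ => col ++ [(PySem.Dict.empty : PySem.Dict Int (Option Int))]) []]) []
    = pvCols d := by
  rw [pv_matrix_eq]; rfl

theorem pv_cols_emp (d : String) : ∀ col ∈ pvCols d, ∀ x ∈ col, x = PySem.Dict.empty := by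
  intro col hcol x hx
  simp only [pvCols, List.mem_map] at hcol
  obtain ⟨s, -, rfl⟩ := hcol
  exact List.eq_of_mem_replicate hx

theorem pv_sizes_pos (d : String) : ∀ s ∈ pvSizes d, 0 ≤ s := by
  intro s hs
  simp only [pvSizes, List.mem_map] at hs
  obtain ⟨t, -, rfl⟩ := hs
  exact le_max_right _ _

theorem pv_outer_F0 (upd : PvCell → Int → PvCell) (step : Int) (cols : PvMat) (c : Int)
    (hemp : ∀ col ∈ cols, ∀ x ∈ col, x = PySem.Dict.empty) :
    (PySem.List.pyRange 0 ((cols.length : Nat) : Int) 1).foldl (pvOuter upd step) (cols, c)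
    = pvNumF upd step cols c := by
  have h := pv_outer_F upd step cols [] c hemp
  simpa using h

theorem pv_outer_R0 (upd : PvCell → Int → PvCell) (step : Int) (cols : PvMat) (c : Int)
    (hemp : ∀ col ∈ cols, ∀ x ∈ col, x = PySem.Dict.empty) :
    (PySem.List.pyRange (((cols.length : Nat) : Int) - 1) (-1) (-1)).foldl (pvOuter upd step) (cols, c)
    = pvNumR upd step cols c := by
  have h := pv_outer_R upd step cols [] c hemp
  simpa using h

-- A's Solda/2'li inner body and the Sağda/2'li inner body, as step functions
def pvStepF2 (i : Int) : (PvMat × Int) → Int → (PvMat × Int) := fun st2 rowIndex =>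
  let st3 := (st2.1.modify i.toNat (fun col => col.modify rowIndex.toNat (fun d => d.insert st2.2 none)), st2.2 + 1)
  (st3.1.modify i.toNat (fun col => col.modify rowIndex.toNat (fun d => d.insert st3.2 none)), st3.2 + 1)

def pvStepR2 (i : Int) : (PvMat × Int) → Int → (PvMat × Int) := fun st2 rowIndex =>
  let c1 := st2.2 + 1
  let m1 := st2.1.modify i.toNat (fun col => col.modify rowIndex.toNat (fun d => d.insert c1 none))
  let c2 := c1 - 1
  let m2 := m1.modify i.toNat (fun col => col.modify rowIndex.toNat (fun d => d.insert c2 none))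
  (m2, c2 + 2)

theorem pvStepF2_eq (i : Int) :
    pvStepF2 i = pvInner (fun d c => (d.insert c none).insert (c + 1) none) 2 i := by
  funext st r
  simp only [pvStepF2, pvInner]
  rw [pv_modify_modify, Prod.mk.injEq]
  refine ⟨?_, by ring⟩
  congr 1
  funext a
  rw [pv_modify_modify]

theorem pvStepR2_eq (i : Int) :
    pvStepR2 i = pvInner (fun d c => (d.insert (c + 1) none).insert c none) 2 i := by
  funext st r
  simp only [pvStepR2, pvInner]
  rw [pv_modify_modify, show st.2 + 1 - 1 = st.2 from by ring, Prod.mk.injEq]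
  refine ⟨?_, by ring⟩
  congr 1
  funext a
  rw [pv_modify_modify]

theorem pvA_solda2 (kacli y d : String) (hy : (y == "Solda") = true) (hk : (kacli == "2'li") = true) :
    create_arrangement kacli y d
    = ((pvNumF (fun dd c => (dd.insert c none).insert (c + 1) none) 2 (pvCols d) 1).1).map
        (fun col => col.map (fun dd => dd.items)) := by
  simp only [create_arrangement, hy, hk, if_true]
  rw [pv_matrix_eq']
  show ((PySem.List.pyRange 0 (((pvCols d).length : Nat) : Int) 1).foldl
      (fun st i => (PySem.List.pyRange 0 ((PySem.List.pyGetD st.1 i []).length : Int) 1).foldl (pvStepF2 i) st)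
      (pvCols d, 1)).1.map (fun col => col.map (fun dd => dd.items)) = _
  rw [show (fun (st : PvMat × Int) (i : Int) =>
        (PySem.List.pyRange 0 ((PySem.List.pyGetD st.1 i []).length : Int) 1).foldl (pvStepF2 i) st)
      = pvOuter (fun dd c => (dd.insert c none).insert (c + 1) none) 2 from by
    funext st i; rw [pvStepF2_eq]; rfl]
  rw [pv_outer_F0 _ _ _ _ (pv_cols_emp d)]

theorem pvA_solda1 (kacli y d : String) (hy : (y == "Solda") = true) (hk : (kacli == "2'li") = false) :
    create_arrangement kacli y d
    = ((pvNumF (fun dd c => dd.insert c none) 1 (pvCols d) 1).1).map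
        (fun col => col.map (fun dd => dd.items)) := by
  simp only [create_arrangement, hy, hk, if_true, Bool.false_eq_true, if_false]
  rw [pv_matrix_eq']
  show ((PySem.List.pyRange 0 (((pvCols d).length : Nat) : Int) 1).foldl
      (pvOuter (fun dd c => dd.insert c none) 1) (pvCols d, 1)).1.map
      (fun col => col.map (fun dd => dd.items)) = _
  rw [pv_outer_F0 _ _ _ _ (pv_cols_emp d)]

theorem pvA_sagda1 (kacli y d : String) (hy : (y == "Solda") = false) (hk : (kacli == "1'li") = true) :
    create_arrangement kacli y d
    = ((pvNumR (fun dd c => dd.insert c none) 1 (pvCols d) 1).1).map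
        (fun col => col.map (fun dd => dd.items)) := by
  simp only [create_arrangement, hy, hk, if_true, Bool.false_eq_true, if_false]
  rw [pv_matrix_eq']
  show ((PySem.List.pyRange ((((pvCols d).length : Nat) : Int) - 1) (-1) (-1)).foldl
      (pvOuter (fun dd c => dd.insert c none) 1) (pvCols d, 1)).1.map
      (fun col => col.map (fun dd => dd.items)) = _
  rw [pv_outer_R0 _ _ _ _ (pv_cols_emp d)]

theorem pvA_sagda2 (kacli y d : String) (hy : (y == "Solda") = false) (hk : (kacli == "1'li") = false) :
    create_arrangement kacli y d
    = ((pvNumR (fun dd c => (dd.insert (c + 1) none).insert c none) 2 (pvCols d) 1).1).map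
        (fun col => col.map (fun dd => dd.items)) := by
  simp only [create_arrangement, hy, hk, Bool.false_eq_true, if_false]
  rw [pv_matrix_eq']
  show ((PySem.List.pyRange ((((pvCols d).length : Nat) : Int) - 1) (-1) (-1)).foldl
      (fun st i => (PySem.List.pyRange 0 ((PySem.List.pyGetD st.1 i []).length : Int) 1).foldl (pvStepR2 i) st)
      (pvCols d, 1)).1.map (fun col => col.map (fun dd => dd.items)) = _
  rw [show (fun (st : PvMat × Int) (i : Int) =>
        (PySem.List.pyRange 0 ((PySem.List.pyGetD st.1 i []).length : Int) 1).foldl (pvStepR2 i) st)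
      = pvOuter (fun dd c => (dd.insert (c + 1) none).insert c none) 2 from by
    funext st i; rw [pvStepR2_eq]; rfl]
  rw [pv_outer_R0 _ _ _ _ (pv_cols_emp d)]

theorem pvB_solda2 (kacli y d : String) (hy : (y == "Solda") = true) (hk : (kacli == "2'li") = true) :
    create_arrangement_alt kacli y d
    = ((pvNumF (fun dd c => (dd.insert c none).insert (c + 1) none) 2 (pvCols d) 1).1).map
        (fun col => col.map (fun dd => dd.items)) := by
  simp only [create_arrangement_alt, hy, hk, if_true]
  rw [if_neg (by decide : ¬(((2 : Int) == (1 : Int)) = true))]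
  rw [pv_scan, List.nil_append]
  exact (pv_B_forward (fun dd c => (dd.insert c none).insert (c + 1) none) 2
    (fun x => [(x, none), (x + 1, none)]) pv_items_upd2F (pvSizes d) (pv_sizes_pos d) 1).symm

theorem pvB_solda1 (kacli y d : String) (hy : (y == "Solda") = true) (hk : (kacli == "2'li") = false) :
    create_arrangement_alt kacli y d
    = ((pvNumF (fun dd c => dd.insert c none) 1 (pvCols d) 1).1).map
        (fun col => col.map (fun dd => dd.items)) := by
  simp only [create_arrangement_alt, hy, hk, if_true, Bool.false_eq_true, if_false]
  rw [if_pos (by decide : (((1 : Int) == (1 : Int)) = true))]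
  rw [pv_scan, List.nil_append]
  have h := pv_B_forward (fun dd c => dd.insert c none) 1
    (fun x => [(x, none)]) pv_items_upd1 (pvSizes d) (pv_sizes_pos d) 1
  simp only [one_mul] at h
  exact h.symm

theorem pvB_sagda1 (kacli y d : String) (hy : (y == "Solda") = false) (hk : (kacli == "1'li") = true) :
    create_arrangement_alt kacli y d
    = ((pvNumR (fun dd c => dd.insert c none) 1 (pvCols d) 1).1).map
        (fun col => col.map (fun dd => dd.items)) := by
  simp only [create_arrangement_alt, hy, hk, if_true, Bool.false_eq_true, if_false]
  rw [if_pos (by decide : (((1 : Int) == (1 : Int)) = true))]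
  rw [pv_scan, List.nil_append]
  have h := pv_B_reverse (fun dd c => dd.insert c none) 1
    (fun x => [(x, none)]) pv_items_upd1 (pvSizes d) (pv_sizes_pos d) 1
  simp only [one_mul] at h
  exact h.symm

theorem pvB_sagda2 (kacli y d : String) (hy : (y == "Solda") = false) (hk : (kacli == "1'li") = false) :
    create_arrangement_alt kacli y d
    = ((pvNumR (fun dd c => (dd.insert (c + 1) none).insert c none) 2 (pvCols d) 1).1).map
        (fun col => col.map (fun dd => dd.items)) := by
  simp only [create_arrangement_alt, hy, hk, Bool.false_eq_true, if_false]
  rw [if_neg (by decide : ¬(((2 : Int) == (1 : Int)) = true))]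
  rw [pv_scan, List.nil_append]
  exact (pv_B_reverse (fun dd c => (dd.insert (c + 1) none).insert c none) 2
    (fun x => [(x + 1, none), (x, none)]) pv_items_upd2R (pvSizes d) (pv_sizes_pos d) 1).symm

-- ===== VERDICT (by name: the statement is the Claim_ definition above) =====
theorem create_arrangement_spec : Claim_equal_create_arrangement := by
  intro kacli ogretmen_yonu oturma_duzeni _ _
  unfold Spec_create_arrangement
  cases hy : (ogretmen_yonu == "Solda") with
  | true =>
    cases hk : (kacli == "2'li") with
    | true => rw [pvA_solda2 kacli ogretmen_yonu oturma_duzeni hy hk,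
                  pvB_solda2 kacli ogretmen_yonu oturma_duzeni hy hk]
    | false => rw [pvA_solda1 kacli ogretmen_yonu oturma_duzeni hy hk,
                   pvB_solda1 kacli ogretmen_yonu oturma_duzeni hy hk]
  | false =>
    cases hk : (kacli == "1'li") with
    | true => rw [pvA_sagda1 kacli ogretmen_yonu oturma_duzeni hy hk,
                  pvB_sagda1 kacli ogretmen_yonu oturma_duzeni hy hk]
    | false => rw [pvA_sagda2 kacli ogretmen_yonu oturma_duzeni hy hk,
                   pvB_sagda2 kacli ogretmen_yonu oturma_duzeni hy hk]
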